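-- pv_equiv track=rewrite | github.com/CommitHu502Craft/professor-skill | tools/generate_outputs.py | take_top
-- ===== SOURCE A (Python) =====
-- def take_top(items: list[str], limit: int = 5) -> list[str]:
--     seen = set()
--     result = []
--     for item in items:
--         cleaned = item.strip(" -")
--         if not cleaned or cleaned in seen:
--             continue
--         seen.add(cleaned)
--         result.append(cleaned)
--         if len(result) >= limit:
--             break
--     return result
-- ===== SOURCE B (Python) =====
-- def take_top(items: list[str], limit: int = 5) -> list[str]:
--     rest = [item.strip(" -") for item in items]
--     result = []
--     while rest and len(result) < limit:
--         c = rest[0]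
--         if c:
--             result.append(c)
--         rest = [d for d in rest[1:] if d != c]
--     return result
-- ===== Notes on version B (the rewrite author's own statement) =====
-- stated objective: alternative
-- what changed: Replaces A's seen-set bookkeeping with a duplicate-deleting sieve: clean everything up front, then repeatedly take the head of the remaining list, emit it if non-empty, and filter every copy of it out of the remainder, stopping after limit picks.
-- intended difference: On inputs with limit <= 0 and at least one item that strips to a non-empty string, A returns a one-element list (it only checks the limit after appending), while B returns the empty list, which is the intended result of asking for at most zero items. — e.g. on take_top(["a"], 0): A returns ["a"], B returns []
import Mathlib
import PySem

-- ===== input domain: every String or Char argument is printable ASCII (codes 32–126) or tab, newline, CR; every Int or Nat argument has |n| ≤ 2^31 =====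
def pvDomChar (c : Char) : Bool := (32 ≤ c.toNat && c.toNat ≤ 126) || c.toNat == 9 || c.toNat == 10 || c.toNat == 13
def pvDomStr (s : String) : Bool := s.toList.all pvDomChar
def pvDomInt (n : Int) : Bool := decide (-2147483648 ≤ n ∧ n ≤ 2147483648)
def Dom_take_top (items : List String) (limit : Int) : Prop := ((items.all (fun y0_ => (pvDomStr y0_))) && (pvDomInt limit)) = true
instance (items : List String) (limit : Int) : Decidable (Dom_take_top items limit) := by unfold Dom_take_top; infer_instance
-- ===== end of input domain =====

-- B replaces A's seen-set bookkeeping by a duplicate-deleting sieve: clean all items, then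
-- repeatedly take the head, emit it if non-empty, and filter its copies out of the remainder.

-- ===== PORT A =====
-- A's loop: seen set, result accumulator, break once len(result) >= limit.
def take_top_go (limit : Int) : List String → PySem.Set String → List String → List String
  | [], _, result => result
  | item :: rest, seen, result =>
    let cleaned := PySem.Str.stripChars item " -"
    if cleaned = "" ∨ PySem.Set.contains seen cleaned then
      take_top_go limit rest seen result
    else
      let result' := result ++ [cleaned]
      if limit ≤ (result'.length : Int) then result'
      else take_top_go limit rest (PySem.Set.add seen cleaned) result'

def take_top (items : List String) (limit : Int) : List String :=
  take_top_go limit items PySem.Set.empty []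

-- ===== PORT B =====
-- the while loop: head of `rest` is the candidate; all its copies are filtered out of the tail.
-- fuel = current length of `rest` (each iteration consumes at least the head, so it suffices);
-- the fuel-0/nonempty branch is unreachable and only makes the recursion structural.
def take_top_sieve (limit : Int) : Nat → List String → List String → List String
  | _, [], result => result
  | 0, _ :: _, result => result
  | fuel + 1, c :: rest, result =>
    if (result.length : Int) < limit then
      take_top_sieve limit fuel (rest.filter (fun d => d ≠ c))
        (if c ≠ "" then result ++ [c] else result)
    else result

def take_top_alt (items : List String) (limit : Int) : List String :=
  let rest := items.map (fun item => PySem.Str.stripChars item " -")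
  take_top_sieve limit rest.length rest []

-- ===== PRECONDITION & SPEC =====
-- On inputs with limit <= 0 and some item stripping to a non-empty string, A returns a
-- one-element list (it checks the limit only after appending), while B returns [], the
-- intended result of asking for at most zero items.
def D_take_top (items : List String) (limit : Int) : Prop :=
  limit ≤ 0 ∧ ∃ x ∈ items, PySem.Str.stripChars x " -" ≠ ""
instance (items : List String) (limit : Int) : Decidable (D_take_top items limit) := by
  unfold D_take_top; infer_instance

def Spec_take_top (items : List String) (limit : Int) (out : List String) : Prop :=
  ¬ D_take_top items limit → out = take_top_alt items limit
instance (items : List String) (limit : Int) (out : List String) : Decidable (Spec_take_top items limit out) := by unfold Spec_take_top; infer_instance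

def pvDiffWitness_take_top : List String × Int := (["a"], 0)
def pvDiffWitnessOut_take_top : (List String) × (List String) := (["a"], [])

-- ===== CLAIM (what is proved, stated in full; the proofs are below) =====
def Claim_unchanged_take_top : Prop := ∀ (items : List String) (limit : Int), Dom_take_top items limit → Spec_take_top items limit (take_top items limit)
def Claim_changed_take_top : Prop := Dom_take_top (pvDiffWitness_take_top.1) (pvDiffWitness_take_top.2) ∧ D_take_top (pvDiffWitness_take_top.1) (pvDiffWitness_take_top.2) ∧ take_top (pvDiffWitness_take_top.1) (pvDiffWitness_take_top.2) = pvDiffWitnessOut_take_top.1 ∧ take_top_alt (pvDiffWitness_take_top.1) (pvDiffWitness_take_top.2) = pvDiffWitnessOut_take_top.2 ∧ pvDiffWitnessOut_take_top.1 ≠ pvDiffWitnessOut_take_top.2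
def Claim_exact_take_top : Prop := ∀ (items : List String) (limit : Int), Dom_take_top items limit → D_take_top items limit → take_top items limit ≠ take_top_alt items limit

-- ===== LEMMAS AND PROOFS =====

-- reference: the ordered list of distinct cleaned non-empty strings not yet in `seen`
def ttUniq : List String → PySem.Set String → List String
  | [], _ => []
  | x :: xs, seen =>
    let c := PySem.Str.stripChars x " -"
    if c = "" ∨ PySem.Set.contains seen c then ttUniq xs seen
    else c :: ttUniq xs (PySem.Set.add seen c)

theorem ttUniq_go (limit : Int) :
    ∀ (items : List String) (seen : PySem.Set String) (acc : List String),
      (acc.length : Int) < limit →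
      take_top_go limit items seen acc = acc ++ (ttUniq items seen).take (limit.toNat - acc.length) := by
  intro items
  induction items with
  | nil => intro seen acc h; simp [take_top_go, ttUniq]
  | cons x xs ih =>
    intro seen acc h
    simp only [take_top_go, ttUniq]
    split
    · exact ih seen acc h
    · by_cases hb : limit ≤ ((acc ++ [PySem.Str.stripChars x " -"]).length : Int)
      · simp only [hb, if_pos]
        have : limit.toNat - acc.length = 1 := by
          simp only [List.length_append, List.length_cons, List.length_nil] at hb; omega
        simp [this]
      · simp only [hb, if_neg, not_false_iff]
        rw [ih (PySem.Set.add seen (PySem.Str.stripChars x " -")) _ (by exact lt_of_not_ge hb)]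
        have : limit.toNat - acc.length = (limit.toNat - (acc ++ [PySem.Str.stripChars x " -"]).length) + 1 := by
          simp only [List.length_append, List.length_cons, List.length_nil] at *; omega
        simp [this, List.take_succ_cons]

-- proof-side: the sequence of values the sieve emits from an already-cleaned list
def sieveUniq : List String → List String
  | [] => []
  | c :: rest =>
    if c = "" then sieveUniq (rest.filter (fun d => d ≠ c))
    else c :: sieveUniq (rest.filter (fun d => d ≠ c))
termination_by l => l.length
decreasing_by all_goals
  simp only [List.length_unattach]
  exact Nat.lt_succ_of_le (le_trans (List.length_filter_le _ _) (by simp [List.length_attach]))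

-- proof-side: A's seen-set recursion restated over an already-cleaned list
def lUniq : List String → PySem.Set String → List String
  | [], _ => []
  | c :: rest, seen =>
    if c = "" ∨ PySem.Set.contains seen c then lUniq rest seen
    else c :: lUniq rest (PySem.Set.add seen c)

theorem ttUniq_eq_lUniq :
    ∀ (items : List String) (seen : PySem.Set String),
      ttUniq items seen = lUniq (items.map (fun item => PySem.Str.stripChars item " -")) seen := by
  intro items
  induction items with
  | nil => intro seen; simp [ttUniq, lUniq]
  | cons x xs ih =>
    intro seen
    simp only [List.map_cons, ttUniq, lUniq]
    split
    · exact ih seen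
    · rw [ih]

theorem contains_append_singleton (s : PySem.Set String) (c d : String) :
    PySem.Set.contains (s ++ [c]) d = (PySem.Set.contains s d || d == c) := by
  simp only [PySem.Set.contains_eq_listContains]
  by_cases hdc : d = c <;> simp [hdc, List.contains_append]

theorem lUniq_congr :
    ∀ (l : List String) (s t : PySem.Set String),
      (∀ d, d ≠ "" → (PySem.Set.contains s d = PySem.Set.contains t d)) →
      lUniq l s = lUniq l t := by
  intro l
  induction l with
  | nil => intro s t _; simp [lUniq]
  | cons c rest ih =>
    intro s t h
    simp only [lUniq]
    by_cases hc : c = ""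
    · simp only [hc, true_or, if_pos]
      exact ih s t h
    · rw [h c hc]
      by_cases hm : PySem.Set.contains t c = true
      · simp only [hc, hm, or_true, if_pos]
        exact ih s t h
      · have hm' : PySem.Set.contains t c = false := Bool.eq_false_iff.mpr hm
        have hns : c ∉ s := by
          rw [← PySem.Set.contains_iff, h c hc, hm']; exact Bool.false_ne_true
        have hnt : c ∉ t := by
          rw [← PySem.Set.contains_iff, hm']; exact Bool.false_ne_true
        simp only [hc, hm', or_self, Bool.false_eq_true, if_neg, not_false_iff]
        congr 1
        refine ih _ _ ?_
        intro d hd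
        rw [PySem.Set.add_of_not_mem hns, PySem.Set.add_of_not_mem hnt,
          contains_append_singleton, contains_append_singleton, h d hd]

theorem sieveUniq_eq_lUniq :
    ∀ (n : Nat) (l : List String) (seen : PySem.Set String), l.length ≤ n →
      sieveUniq (l.filter (fun d => !(PySem.Set.contains seen d))) = lUniq l seen := by
  intro n
  induction n with
  | zero =>
    intro l seen h
    have hnil : l = [] := List.eq_nil_of_length_eq_zero (Nat.le_zero.mp h)
    simp [hnil, lUniq, sieveUniq]
  | succ n ih =>
    intro l seen h
    match l with
    | [] => simp [lUniq, sieveUniq]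
    | c :: rest =>
      simp only [List.length_cons, Nat.succ_le_succ_iff] at h
      simp only [List.filter_cons, lUniq]
      by_cases hm : PySem.Set.contains seen c = true
      · rw [if_neg (by simpa using List.mem_of_elem_eq_true hm), if_pos (Or.inr hm)]
        exact ih rest seen h
      · have hm' : PySem.Set.contains seen c = false := Bool.eq_false_iff.mpr hm
        have hns : c ∉ seen := by
          rw [← PySem.Set.contains_iff, hm']; exact Bool.false_ne_true
        have hfilter : (rest.filter (fun d => !(PySem.Set.contains seen d))).filter
              (fun d => d ≠ c)
            = rest.filter (fun d => !(PySem.Set.contains (PySem.Set.add seen c) d)) := by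
          rw [List.filter_filter]
          refine List.filter_congr ?_
          intro d _
          rw [PySem.Set.add_of_not_mem hns, contains_append_singleton]
          by_cases hdc : d = c
          · subst hdc; simp [hm']
          · simp [hdc]
        rw [if_pos (by simpa using hns)]
        rw [sieveUniq]
        by_cases hc : c = ""
        · rw [if_pos hc, if_pos (Or.inl hc)]
          rw [hfilter, ih rest (PySem.Set.add seen c) h]
          refine lUniq_congr _ _ _ ?_
          intro d hd
          rw [PySem.Set.add_of_not_mem hns, contains_append_singleton]
          have hdc : (d == c) = false := by
            rw [beq_eq_false_iff_ne]
            intro h'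
            exact hd (h'.trans hc)
          simp [hdc]
        · rw [if_neg hc, if_neg (not_or.mpr ⟨hc, hm⟩)]
          rw [hfilter, ih rest (PySem.Set.add seen c) h]

theorem sieve_stop (limit : Int) (fuel : Nat) (l : List String) (result : List String)
    (h : ¬ (result.length : Int) < limit) : take_top_sieve limit fuel l result = result := by
  match fuel, l with
  | _, [] => simp [take_top_sieve]
  | 0, _ :: _ => simp [take_top_sieve]
  | fuel + 1, c :: rest => simp only [take_top_sieve, if_neg h]

theorem sieve_go (limit : Int) :
    ∀ (fuel : Nat) (l : List String) (result : List String), l.length ≤ fuel →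
      (result.length : Int) < limit →
      take_top_sieve limit fuel l result
        = result ++ (sieveUniq l).take (limit.toNat - result.length) := by
  intro fuel
  induction fuel with
  | zero =>
    intro l result h _
    have hnil : l = [] := List.eq_nil_of_length_eq_zero (Nat.le_zero.mp h)
    simp [hnil, take_top_sieve, sieveUniq]
  | succ n ih =>
    intro l result h hlt
    match l with
    | [] => simp [take_top_sieve, sieveUniq]
    | c :: rest =>
      simp only [List.length_cons, Nat.succ_le_succ_iff] at h
      have hlen : (rest.filter (fun d => d ≠ c)).length ≤ n :=
        Nat.le_trans (List.length_filter_le _ _) h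
      simp only [take_top_sieve, if_pos hlt, sieveUniq]
      by_cases hc : c = ""
      · rw [if_neg (by simp [hc]), if_pos hc]
        exact ih _ result hlen hlt
      · rw [if_pos hc, if_neg hc]
        by_cases hb : ((result ++ [c]).length : Int) < limit
        · rw [ih _ _ hlen hb]
          have harith : limit.toNat - result.length
              = (limit.toNat - (result ++ [c]).length) + 1 := by
            simp only [List.length_append, List.length_cons, List.length_nil] at *
            omega
          simp [harith, List.take_succ_cons]
        · rw [sieve_stop limit _ _ _ hb]
          have harith : limit.toNat - result.length = 1 := by
            simp only [List.length_append, List.length_cons, List.length_nil] at hb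
            omega
          simp [harith]

-- B = the first `limit.toNat` entries of ttUniq items ∅
theorem alt_eq_take (items : List String) (limit : Int) :
    take_top_alt items limit = (ttUniq items PySem.Set.empty).take limit.toNat := by
  unfold take_top_alt
  rw [ttUniq_eq_lUniq]
  by_cases hl : (0 : Int) < limit
  · rw [sieve_go limit (items.map (fun item => PySem.Str.stripChars item " -")).length _ []
        le_rfl (by simpa using hl)]
    rw [← sieveUniq_eq_lUniq (items.map (fun item => PySem.Str.stripChars item " -")).length _
        PySem.Set.empty le_rfl]
    have hid : (items.map (fun item => PySem.Str.stripChars item " -")).filter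
        (fun d => !(PySem.Set.contains PySem.Set.empty d))
        = items.map (fun item => PySem.Str.stripChars item " -") := by
      refine List.filter_eq_self.mpr ?_
      intro d _
      simp [PySem.Set.empty, PySem.Set.contains]
    simp [hid]
  · rw [sieve_stop limit _ _ _ (by simpa using hl)]
    have h0 : limit.toNat = 0 := by omega
    simp [h0]

theorem go_all_empty :
    ∀ (items : List String) (seen : PySem.Set String) (acc : List String),
      (∀ x ∈ items, PySem.Str.stripChars x " -" = "") →
      take_top_go limit items seen acc = acc := by
  intro items
  induction items with
  | nil => intro seen acc _; simp [take_top_go]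
  | cons x xs ih =>
    intro seen acc h
    have hx : PySem.Str.stripChars x " -" = "" := h x (by simp)
    simp only [take_top_go, hx]
    simp only [true_or, if_pos]
    exact ih seen acc (fun y hy => h y (by simp [hy]))

theorem go_ne_nil_of_D (limit : Int) (hlim : limit ≤ 0) :
    ∀ (items : List String), (∃ x ∈ items, PySem.Str.stripChars x " -" ≠ "") →
      take_top_go limit items PySem.Set.empty [] ≠ [] := by
  intro items
  induction items with
  | nil => intro h; simp at h
  | cons x xs ih =>
    intro h
    by_cases hx : PySem.Str.stripChars x " -" = ""
    · have hxs : ∃ y ∈ xs, PySem.Str.stripChars y " -" ≠ "" := by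
        rcases h with ⟨y, hy, hne⟩
        rcases List.mem_cons.mp hy with rfl | hy'
        · exact absurd hx hne
        · exact ⟨y, hy', hne⟩
      simp only [take_top_go, hx, true_or, if_pos]
      exact ih hxs
    · have hcon : PySem.Set.contains PySem.Set.empty (PySem.Str.stripChars x " -") = false := by
        simp [PySem.Set.empty, PySem.Set.contains]
      simp only [take_top_go, hx, hcon]
      have hbr : limit ≤ (1 : Int) := by omega
      simp [hbr]

-- ===== VERDICT (by name: the statement is the Claim_ definition above) =====
theorem take_top_spec : Claim_unchanged_take_top := by
  intro items limit _ hD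
  unfold D_take_top at hD
  rw [alt_eq_take]
  by_cases hl : 0 < limit
  · unfold take_top
    rw [ttUniq_go limit items PySem.Set.empty [] (by simpa using hl)]
    simp
  · have hall : ∀ x ∈ items, PySem.Str.stripChars x " -" = "" := by
      intro x hx
      by_contra hne
      exact hD ⟨by omega, x, hx, hne⟩
    unfold take_top
    rw [go_all_empty items PySem.Set.empty [] hall]
    have : limit.toNat = 0 := by omega
    rw [this, List.take_zero]

theorem take_top_changed : Claim_changed_take_top := by unfold Claim_changed_take_top; decide

theorem take_top_tight : Claim_exact_take_top := by
  intro items limit _ hD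
  rcases hD with ⟨hlim, hx⟩
  rw [alt_eq_take]
  have : limit.toNat = 0 := by omega
  rw [this, List.take_zero]
  exact go_ne_nil_of_D limit hlim items hx
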